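-- pv_equiv track=rewrite | github.com/AlekseiSeleznev/onec-mcp-universal | gateway/gateway/tool_handlers/export.py | _container_fallback_index_path
-- ===== SOURCE A (Python) =====
-- def _container_fallback_index_path(path: str) -> str:
--     """Force container-only indexing for gateway-specific mount paths."""
--     normalized = (path or "").rstrip("/").rstrip("\\")
--     if normalized in {"/hostfs-home", "/workspace", "/projects"}:
--         return "/projects"
--     for prefix in ("/hostfs-home/", "/workspace/", "/projects/"):
--         if normalized.startswith(prefix):
--             return "/projects"
--     return path
-- ===== SOURCE B (Python) =====
-- def _container_fallback_index_path(path: str) -> str: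
--     """Force container-only indexing for gateway-specific mount paths."""
--     normalized = (path or "").rstrip("/").rstrip("\\")
--     if normalized.startswith("/"):
--         head = normalized[1:].split("/", 1)[0]
--         if head in ("hostfs-home", "workspace", "projects"):
--             return "/projects"
--     return path
-- ===== Notes on version B (the rewrite author's own statement) =====
-- stated objective: simpler
-- what changed: Replaces A's set-membership test plus a prefix-scan loop over three literal prefixes by a single test on the leading path component: after the same normalization, take the first path segment behind the leading separator and compare it against the three mount names.
import Mathlib
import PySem

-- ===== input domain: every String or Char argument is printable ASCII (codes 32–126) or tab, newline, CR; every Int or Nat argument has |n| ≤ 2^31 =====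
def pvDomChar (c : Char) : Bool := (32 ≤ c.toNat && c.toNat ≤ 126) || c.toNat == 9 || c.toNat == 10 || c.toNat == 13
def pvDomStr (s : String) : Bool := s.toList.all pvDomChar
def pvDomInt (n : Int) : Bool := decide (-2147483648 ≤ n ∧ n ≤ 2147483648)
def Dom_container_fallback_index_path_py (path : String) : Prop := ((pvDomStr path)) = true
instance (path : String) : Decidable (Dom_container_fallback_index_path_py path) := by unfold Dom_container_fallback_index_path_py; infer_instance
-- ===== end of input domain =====

-- B replaces A's set-membership test plus prefix-scan loop by one test on the leading path component (simpler decomposition, same cost).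


-- ===== PORT A =====
-- hand port of str.rstrip(c) for a single strip character (PySem has no one-sided rstrip-with-chars);
-- exact: drops exactly the trailing occurrences of c
def pvRstrip (cs : List Char) (c : Char) : List Char := (cs.reverse.dropWhile (· == c)).reverse

def container_fallback_index_path_py (path : String) : String :=
  -- (path or "") is path itself for a str argument
  let normalized : String := String.ofList (pvRstrip (pvRstrip path.toList '/') '\\')
  if normalized = "/hostfs-home" ∨ normalized = "/workspace" ∨ normalized = "/projects" then "/projects"
  else if PySem.Str.startswith normalized "/hostfs-home/" then "/projects"
  else if PySem.Str.startswith normalized "/workspace/" then "/projects"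
  else if PySem.Str.startswith normalized "/projects/" then "/projects"
  else path

-- ===== PORT B =====
def container_fallback_index_path_py_alt (path : String) : String :=
  let normalized : String := String.ofList (pvRstrip (pvRstrip path.toList '/') '\\')
  if PySem.Str.startswith normalized "/" then
    -- normalized[1:].split("/", 1)[0]: with a single-char separator the first piece is
    -- exactly the characters before the first '/', so this takeWhile is an exact port
    let head : List Char := (normalized.toList.drop 1).takeWhile (fun c => c ≠ '/')
    if head = "hostfs-home".toList ∨ head = "workspace".toList ∨ head = "projects".toList then "/projects"
    else path
  else path

-- ===== PRECONDITION & SPEC =====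
def Spec_container_fallback_index_path_py (path : String) (out : String) : Prop := out = container_fallback_index_path_py_alt path
instance (path : String) (out : String) : Decidable (Spec_container_fallback_index_path_py path out) := by unfold Spec_container_fallback_index_path_py; infer_instance

-- ===== CLAIM (what is proved, stated in full; the proofs are below) =====
def Claim_equal_container_fallback_index_path_py : Prop := ∀ (path : String), Dom_container_fallback_index_path_py path → Spec_container_fallback_index_path_py path (container_fallback_index_path_py path)

-- ===== LEMMAS AND PROOFS =====

-- the first piece of t.split('/') equals w  iff  t is w or t starts with w followed by '/'
theorem pv_takeWhile_eq_iff (w : List Char) (hw : '/' ∉ w) :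
    ∀ (t : List Char), (t.takeWhile (fun c => c ≠ '/') = w ↔ (t = w ∨ (w ++ ['/']) <+: t)) := by
  induction w with
  | nil =>
      intro t
      cases t with
      | nil => simp
      | cons c t =>
          by_cases hc : c = '/'
          · subst hc; simp [List.takeWhile, List.cons_prefix_cons]
          · simp [List.takeWhile, hc, List.cons_prefix_cons,
              (show ¬('/' = c) from fun h => hc h.symm)]
  | cons a w ih =>
      intro t
      have ha : a ≠ '/' := by intro h; subst h; exact hw (List.mem_cons_self ..)
      have hw' : '/' ∉ w := fun h => hw (List.mem_cons_of_mem a h)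
      cases t with
      | nil => simp
      | cons c t =>
          by_cases hc : c = '/'
          · subst hc
            simp [List.takeWhile, List.cons_prefix_cons, ha,
              (show ¬('/' = a) from fun h => ha h.symm)]
          · have h1 : List.takeWhile (fun c => c ≠ '/') (c :: t)
                = c :: List.takeWhile (fun c => c ≠ '/') t := by simp [List.takeWhile, hc]
            rw [h1]
            simp only [List.cons.injEq, List.cons_append, List.cons_prefix_cons, ih hw' t]
            constructor
            · rintro ⟨rfl, h | h⟩
              · exact Or.inl ⟨rfl, h⟩
              · exact Or.inr ⟨rfl, h⟩
            · rintro (⟨rfl, rfl⟩ | ⟨rfl, h⟩)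
              · exact ⟨rfl, Or.inl rfl⟩
              · exact ⟨rfl, Or.inr h⟩

theorem pv_ofList_eq_iff (l : List Char) (s : String) : String.ofList l = s ↔ l = s.toList := by
  constructor
  · intro h; simpa using congrArg String.toList h
  · intro h; subst h; simp

-- ===== VERDICT (by name: the statement is the Claim_ definition above) =====
set_option maxHeartbeats 1000000 in
theorem container_fallback_index_path_py_spec : Claim_equal_container_fallback_index_path_py := by
  intro path _
  unfold Spec_container_fallback_index_path_py container_fallback_index_path_py container_fallback_index_path_py_alt
  generalize pvRstrip (pvRstrip path.toList '/') '\\' = l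
  have h1 := pv_takeWhile_eq_iff "hostfs-home".toList (by decide)
  have h2 := pv_takeWhile_eq_iff "workspace".toList (by decide)
  have h3 := pv_takeWhile_eq_iff "projects".toList (by decide)
  have e1 : "/hostfs-home".toList = '/' :: "hostfs-home".toList := by rfl
  have e1' : "/hostfs-home/".toList = '/' :: ("hostfs-home".toList ++ ['/']) := by rfl
  have e2 : "/workspace".toList = '/' :: "workspace".toList := by rfl
  have e2' : "/workspace/".toList = '/' :: ("workspace".toList ++ ['/']) := by rfl
  have e3 : "/projects".toList = '/' :: "projects".toList := by rfl
  have e3' : "/projects/".toList = '/' :: ("projects".toList ++ ['/']) := by rfl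
  have e0 : "/".toList = ['/'] := by rfl
  simp only [PySem.Str.startswith_eq, String.toList_ofList, pv_ofList_eq_iff,
    PySem.Chars.startswith_iff, e1, e1', e2, e2', e3, e3', e0]
  cases l with
  | nil => simp
  | cons c t =>
      by_cases hc : c = '/'
      · subst hc
        simp only [List.cons.injEq, List.cons_prefix_cons, true_and, List.drop_succ_cons,
          List.drop_zero, h1, h2, h3]
        split_ifs <;> tauto
      · have hc' : ¬ ('/' : Char) = c := fun h => hc h.symm
        simp [List.cons_prefix_cons, hc, hc']
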